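-- pv_equiv track=rewrite | github.com/DannyM-Deakin/SIT215 | Assignment 1 Files/215_assignment_test.py | dfs
-- ===== SOURCE A (Python) =====
-- def dfs(maze, visited, row, col, end_row, end_col):
--     # Check if we have reached the end point
--     if row == end_row and col == end_col:
--         return True
--
--     # Mark the current cell as visited
--     visited[row][col] = True
--
--     # Check the neighbors of the current cell
--     for dr, dc in [(1, 0), (-1, 0), (0, 1), (0, -1)]:
--         r, c = row + dr, col + dc
--         if r >= 0 and r < len(maze) and c >= 0 and c < len(maze[0]):
--             if maze[r][c] != "#" and not visited[r][c]:
--                 # Recursively search for a path from the neighbor cell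
--                 if dfs(maze, visited, r, c, end_row, end_col):
--                     # Mark the path and return True
--                     maze[r][c] = "*"
--                     return True
--
--     # If no path is found, return False
--     return False
-- ===== SOURCE B (Python) =====
-- def dfs(maze, visited, row, col, end_row, end_col):
--     if row == end_row and col == end_col:
--         return True
--     visited[row][col] = True
--     dirs = [(1, 0), (-1, 0), (0, 1), (0, -1)]
--     # explicit stack of frames: (cell row, cell col, index of next direction to try)
--     stack = [(row, col, 0)]
--     while stack:
--         r0, c0, i = stack[-1]
--         if i == 4:
--             stack.pop()
--             continue
--         stack[-1] = (r0, c0, i + 1)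
--         r, c = r0 + dirs[i][0], c0 + dirs[i][1]
--         if 0 <= r < len(maze) and 0 <= c < len(maze[0]) and maze[r][c] != "#" and not visited[r][c]:
--             if r == end_row and c == end_col:
--                 # mark the found path: the end cell and every stack cell except the start
--                 maze[r][c] = "*"
--                 for fr, fc, _ in stack[1:]:
--                     maze[fr][fc] = "*"
--                 return True
--             visited[r][c] = True
--             stack.append((r, c, 0))
--     return False
-- ===== Notes on version B (the rewrite author's own statement) =====
-- stated objective: alternative
-- what changed: A's recursive DFS is replaced by an iterative DFS driven by an explicit stack of (cell, next-direction-index) frames, with the found path marked by walking the stack instead of unwinding the recursion (same traversal order and cost, no recursion and no recursion-depth limit).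
-- outside the precondition, e.g. on dfs([['.', '#'], ['.']], [[False, False], [False]], 0, 0, 1, 0): A returns True, B returns True
import Mathlib
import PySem

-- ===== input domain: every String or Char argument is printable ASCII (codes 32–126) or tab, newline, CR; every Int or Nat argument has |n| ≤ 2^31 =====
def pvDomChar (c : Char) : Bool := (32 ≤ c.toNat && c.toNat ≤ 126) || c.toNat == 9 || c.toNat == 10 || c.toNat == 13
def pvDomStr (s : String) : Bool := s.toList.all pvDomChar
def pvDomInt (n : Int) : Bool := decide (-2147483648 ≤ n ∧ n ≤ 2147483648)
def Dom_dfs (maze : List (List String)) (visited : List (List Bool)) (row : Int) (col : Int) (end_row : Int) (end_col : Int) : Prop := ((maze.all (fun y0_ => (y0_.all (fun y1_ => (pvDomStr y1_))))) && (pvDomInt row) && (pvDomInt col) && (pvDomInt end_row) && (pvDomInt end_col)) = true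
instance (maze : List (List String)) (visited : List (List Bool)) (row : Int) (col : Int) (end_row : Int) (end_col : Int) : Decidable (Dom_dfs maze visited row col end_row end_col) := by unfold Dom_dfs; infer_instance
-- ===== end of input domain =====

-- B replaces A's recursive DFS by an iterative DFS over an explicit stack of (cell, next-direction)
-- frames (objective: alternative decomposition, same traversal order and cost). Both A and B mutate
-- `visited` and `maze` in place in exactly the same way; the equivalence proved here is about the
-- return value only (the ports thread `visited` functionally and drop the final `maze` stars, which
-- never influence the returned Bool).

-- shared Python-primitive helpers (indexing / item assignment, exact Python semantics via PySem)
def pvGetS (maze : List (List String)) (r c : Int) : String :=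
  PySem.List.pyGetD (PySem.List.pyGetD maze r []) c ""
def pvGetB (vis : List (List Bool)) (r c : Int) : Bool :=
  PySem.List.pyGetD (PySem.List.pyGetD vis r []) c false
-- visited[r][c] = True
def pvSetB (vis : List (List Bool)) (r c : Int) : List (List Bool) :=
  PySem.List.pySetD vis r (PySem.List.pySetD (PySem.List.pyGetD vis r []) c true)
def pvDirs : List (Int × Int) := [(1, 0), (-1, 0), (0, 1), (0, -1)]
-- the neighbour test 'r >= 0 and r < len(maze) and c >= 0 and c < len(maze[0])' + wall + visited
def pvOk (maze : List (List String)) (vis : List (List Bool)) (r c : Int) : Bool :=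
  decide (0 ≤ r) && decide (r < (maze.length : Int)) && decide (0 ≤ c) &&
    decide (c < ((maze.headD []).length : Int)) &&
    !(pvGetS maze r c == "#") && !(pvGetB vis r c)

-- ===== PORT A =====
-- A's recursion, fuel-guarded for totality only (the wrappers pass fuel bounding the DFS depth,
-- never exhausted on inputs satisfying Pre_); `visited` is threaded as functional state.
mutual
def dfsGo (maze : List (List String)) (er ec : Int) (f : Nat) (v : List (List Bool))
    (row col : Int) : Bool × List (List Bool) :=
  if row = er ∧ col = ec then (true, v)
  else
    match f with
    | 0 => (false, v)      -- fuel guard only; unreachable under Pre_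
    | f' + 1 => dfsLoop maze er ec f' (pvSetB v row col) row col pvDirs
termination_by 6 * f
decreasing_by simp [pvDirs]; omega

def dfsLoop (maze : List (List String)) (er ec : Int) (f : Nat) (v : List (List Bool))
    (row col : Int) (ds : List (Int × Int)) : Bool × List (List Bool) :=
  match ds with
  | [] => (false, v)
  | (dr, dc) :: rest =>
    if pvOk maze v (row + dr) (col + dc) then
      match dfsGo maze er ec f v (row + dr) (col + dc) with
      | (true, v') => (true, v')
      | (false, v') => dfsLoop maze er ec f v' row col rest
    else dfsLoop maze er ec f v row col rest
termination_by 6 * f + 1 + ds.length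
decreasing_by all_goals simp <;> omega
end

def dfs (maze : List (List String)) (visited : List (List Bool)) (row : Int) (col : Int) (end_row : Int) (end_col : Int) : Bool :=
  (dfsGo maze end_row end_col (maze.length * (maze.headD []).length + 1) visited row col).1

-- ===== PORT B =====
-- termination measure for the stack machine: a frame processed at depth-fuel f weighs 6^f·(dirs left + 1)
def pvMS : Nat → List (Int × Int × List (Int × Int)) → Nat
  | _, [] => 0
  | f, (_, _, ds) :: K => 6 ^ f * (ds.length + 1) + pvMS (f + 1) K

theorem pvMS_skip (f : Nat) (r0 c0 : Int) (x : Int × Int) (rest : List (Int × Int))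
    (K : List (Int × Int × List (Int × Int))) :
    pvMS f ((r0, c0, rest) :: K) < pvMS f ((r0, c0, x :: rest) :: K) := by
  have h : 0 < 6 ^ f := pow_pos (by norm_num) f
  simp only [pvMS, List.length_cons]
  nlinarith

theorem pvMS_pop (f : Nat) (r0 c0 : Int) (fr : Int × Int × List (Int × Int))
    (K : List (Int × Int × List (Int × Int))) :
    pvMS (f + 1) (fr :: K) < pvMS f ((r0, c0, ([] : List (Int × Int))) :: fr :: K) := by
  have h : 0 < 6 ^ f := pow_pos (by norm_num) f
  obtain ⟨a2, b2, ds2⟩ := fr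
  simp only [pvMS, List.length_nil]
  nlinarith

theorem pvMS_push (f : Nat) (r c r0 c0 : Int) (x : Int × Int) (rest : List (Int × Int))
    (K : List (Int × Int × List (Int × Int))) :
    pvMS f ((r, c, pvDirs) :: (r0, c0, rest) :: K) < pvMS (f + 1) ((r0, c0, x :: rest) :: K) := by
  have h : 0 < 6 ^ f := pow_pos (by norm_num) f
  simp only [pvMS, pvDirs, List.length_cons, List.length_nil, pow_succ]
  nlinarith

-- the iterative DFS: stack of frames (cell, directions still to try); fuel tracks the remaining
-- depth budget (it grows back by one on a pop), a totality guard only, never exhausted under Pre_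
def runFrame (maze : List (List String)) (er ec : Int) (f : Nat) (v : List (List Bool))
    (r0 c0 : Int) (ds : List (Int × Int))
    (K : List (Int × Int × List (Int × Int))) : Bool :=
  match ds with
  | [] =>
    match K with
    | [] => false
    | (r', c', ds') :: K' => runFrame maze er ec (f + 1) v r' c' ds' K'
  | (dr, dc) :: rest =>
    if pvOk maze v (r0 + dr) (c0 + dc) then
      if r0 + dr = er ∧ c0 + dc = ec then true
      else
        match f with
        | 0 => runFrame maze er ec 0 v r0 c0 rest K   -- depth-fuel guard only; unreachable under Pre_
        | f' + 1 =>
          runFrame maze er ec f' (pvSetB v (r0 + dr) (c0 + dc)) (r0 + dr) (c0 + dc) pvDirs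
            ((r0, c0, rest) :: K)
    else runFrame maze er ec f v r0 c0 rest K
termination_by pvMS f ((r0, c0, ds) :: K)
decreasing_by all_goals first
  | exact pvMS_pop _ _ _ _ _
  | exact pvMS_push _ _ _ _ _ _ _ _
  | exact pvMS_skip _ _ _ _ _ _

def dfs_alt (maze : List (List String)) (visited : List (List Bool)) (row : Int) (col : Int) (end_row : Int) (end_col : Int) : Bool :=
  if row = end_row ∧ col = end_col then true
  else
    runFrame maze end_row end_col (maze.length * (maze.headD []).length)
      (pvSetB visited row col) row col pvDirs []

-- ===== PRECONDITION & SPEC =====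
-- Pre_ excludes exactly the inputs where Python A hits an IndexError: a start cell outside
-- visited's (Python, possibly negative) index range unless start = end (where A returns True
-- untouched), and grids/visited whose searched rows have fewer than len(maze[0]) columns.  This
-- slightly narrows A's domain: on a few such inputs A happens to return before reaching a bad
-- index (e.g. a short row the search never enters); B returns the same value there.  The ports
-- themselves are total and pv_total_eq below proves them equal on every input, so the proof of the
-- claim does not need Pre_; Pre_ only delimits where Python A returns normally.
def Pre_dfs (maze : List (List String)) (visited : List (List Bool)) (row : Int) (col : Int) (end_row : Int) (end_col : Int) : Prop :=
  (row = end_row ∧ col = end_col) ∨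
  (PySem.Raise.InRange visited.length row ∧
   PySem.Raise.InRange (PySem.List.pyGetD visited row []).length col ∧
   maze.length ≤ visited.length ∧
   (∀ w ∈ visited.take maze.length, (maze.headD []).length ≤ w.length) ∧
   (∀ r ∈ maze, (maze.headD []).length ≤ r.length))
instance (maze : List (List String)) (visited : List (List Bool)) (row : Int) (col : Int) (end_row : Int) (end_col : Int) : Decidable (Pre_dfs maze visited row col end_row end_col) := by unfold Pre_dfs; infer_instance
def pvWitness_dfs : List (List String) × List (List Bool) × Int × Int × Int × Int :=
  ([[".", "."], [".", "#"]], [[false, false], [false, false]], 0, 0, 1, 0)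

def Spec_dfs (maze : List (List String)) (visited : List (List Bool)) (row : Int) (col : Int) (end_row : Int) (end_col : Int) (out : Bool) : Prop := out = dfs_alt maze visited row col end_row end_col
instance (maze : List (List String)) (visited : List (List Bool)) (row : Int) (col : Int) (end_row : Int) (end_col : Int) (out : Bool) : Decidable (Spec_dfs maze visited row col end_row end_col out) := by unfold Spec_dfs; infer_instance

-- ===== CLAIM (what is proved, stated in full; the proofs are below) =====
def Claim_equal_dfs : Prop := ∀ (maze : List (List String)) (visited : List (List Bool)) (row : Int) (col : Int) (end_row : Int) (end_col : Int), Dom_dfs maze visited row col end_row end_col → Pre_dfs maze visited row col end_row end_col → Spec_dfs maze visited row col end_row end_col (dfs maze visited row col end_row end_col)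

-- ===== LEMMAS AND PROOFS =====

theorem pvMS_pos (f : Nat) (fr : Int × Int × List (Int × Int))
    (K : List (Int × Int × List (Int × Int))) : 1 ≤ pvMS f (fr :: K) := by
  obtain ⟨a2, b2, ds2⟩ := fr  -- destructure so pvMS unfolds? no: keep; see below
  have h : 0 < 6 ^ f := pow_pos (by norm_num) f
  simp only [pvMS]
  nlinarith


-- what the machine does when the current frame is exhausted and the stack is K
def pvCont (maze : List (List String)) (er ec : Int) (f : Nat) (v : List (List Bool))
    (K : List (Int × Int × List (Int × Int))) : Bool :=
  match K with
  | [] => false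
  | (r', c', ds') :: K' => runFrame maze er ec f v r' c' ds' K'

-- Defunctionalization simulation: running the machine with current frame (r0,c0,ds) over stack K
-- is A's inner loop on ds followed (on failure) by the continuation of the stack.
theorem pvSim (maze : List (List String)) (er ec : Int) :
    ∀ (N f : Nat) (v : List (List Bool)) (r0 c0 : Int) (ds : List (Int × Int))
      (K : List (Int × Int × List (Int × Int))),
      pvMS f ((r0, c0, ds) :: K) ≤ N →
      runFrame maze er ec f v r0 c0 ds K =
        (match dfsLoop maze er ec f v r0 c0 ds with
         | (true, _) => true
         | (false, v') => pvCont maze er ec (f + 1) v' K) := by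
  intro N
  induction N with
  | zero =>
    intro f v r0 c0 ds K hle
    exact absurd hle (by have := pvMS_pos f (r0, c0, ds) K; omega)
  | succ N ih =>
    intro f v r0 c0 ds K hle
    match ds with
    | [] =>
      match K with
      | [] => simp [runFrame, dfsLoop, pvCont]
      | (r', c', ds') :: K' => simp [runFrame, dfsLoop, pvCont]
    | (dr, dc) :: rest =>
      by_cases hok : pvOk maze v (r0 + dr) (c0 + dc) = true
      · by_cases hend : r0 + dr = er ∧ c0 + dc = ec
        · obtain ⟨he1, he2⟩ := hend
          subst he1; subst he2
          rw [runFrame.eq_def]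
          conv_rhs => rw [dfsLoop.eq_def]
          simp [hok, dfsGo.eq_def]
        · match f with
          | 0 =>
            have h1 : pvMS 0 ((r0, c0, rest) :: K) ≤ N := by
              have := pvMS_skip 0 r0 c0 (dr, dc) rest K; omega
            rw [show runFrame maze er ec 0 v r0 c0 ((dr, dc) :: rest) K
                  = runFrame maze er ec 0 v r0 c0 rest K from by
                simp [runFrame, hok, hend]]
            rw [ih 0 v r0 c0 rest K h1]
            simp [dfsLoop, dfsGo, hok, hend]
          | f' + 1 =>
            have hm := pvMS_push f' (r0 + dr) (c0 + dc) r0 c0 (dr, dc) rest K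
            have h1 : pvMS f' ((r0 + dr, c0 + dc, pvDirs) :: (r0, c0, rest) :: K) ≤ N := by
              omega
            have h2 : pvMS (f' + 1) ((r0, c0, rest) :: K) ≤ N := by
              have := pvMS_skip (f' + 1) r0 c0 (dr, dc) rest K; omega
            rw [show runFrame maze er ec (f' + 1) v r0 c0 ((dr, dc) :: rest) K
                  = runFrame maze er ec f' (pvSetB v (r0 + dr) (c0 + dc)) (r0 + dr) (c0 + dc)
                      pvDirs ((r0, c0, rest) :: K) from by
                simp [runFrame, hok, hend]]
            rw [ih f' (pvSetB v (r0 + dr) (c0 + dc)) (r0 + dr) (c0 + dc) pvDirs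
                  ((r0, c0, rest) :: K) h1]
            cases hres : dfsLoop maze er ec f' (pvSetB v (r0 + dr) (c0 + dc)) (r0 + dr)
                (c0 + dc) pvDirs with
            | mk b w =>
              cases b
              · -- inner call failed: pop back to (r0,c0,rest), which is ih again
                show runFrame maze er ec (f' + 1) w r0 c0 rest K = _
                rw [ih (f' + 1) w r0 c0 rest K h2]
                have hstep : dfsLoop maze er ec (f' + 1) v r0 c0 ((dr, dc) :: rest)
                    = dfsLoop maze er ec (f' + 1) w r0 c0 rest := by
                  rw [dfsLoop.eq_def]
                  simp [hok, dfsGo.eq_def, hend, hres]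
                rw [hstep]
              · -- inner call succeeded: both sides are true
                simp [dfsLoop, dfsGo, hok, hend, hres]
      · -- neighbour rejected: skip the direction on both sides
        have h1 : pvMS f ((r0, c0, rest) :: K) ≤ N := by
          have := pvMS_skip f r0 c0 (dr, dc) rest K; omega
        rw [show runFrame maze er ec f v r0 c0 ((dr, dc) :: rest) K
              = runFrame maze er ec f v r0 c0 rest K from by
            rw [runFrame.eq_def]; simp [hok]]
        rw [ih f v r0 c0 rest K h1]
        conv_rhs => rw [dfsLoop.eq_def]
        simp [hok]

theorem pv_total_eq (maze : List (List String)) (visited : List (List Bool))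
    (row col er ec : Int) :
    dfs maze visited row col er ec = dfs_alt maze visited row col er ec := by
  unfold dfs dfs_alt
  by_cases hend : row = er ∧ col = ec
  · simp [dfsGo, hend]
  · rw [show dfsGo maze er ec (maze.length * (maze.headD []).length + 1) visited row col
          = dfsLoop maze er ec (maze.length * (maze.headD []).length)
              (pvSetB visited row col) row col pvDirs from by
        simp [dfsGo, hend]]
    rw [pvSim maze er ec
          (pvMS (maze.length * (maze.headD []).length) ((row, col, pvDirs) :: []))
          (maze.length * (maze.headD []).length) (pvSetB visited row col) row col pvDirs []
          (le_refl _)]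
    cases hres : dfsLoop maze er ec (maze.length * (maze.headD []).length)
        (pvSetB visited row col) row col pvDirs with
    | mk b w => cases b <;> simp [hend, pvCont]

-- ===== VERDICT (by name: the statement is the Claim_ definition above) =====
theorem dfs_spec : Claim_equal_dfs := by
  intro maze visited row col er ec _ _
  unfold Spec_dfs
  exact pv_total_eq maze visited row col er ec
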